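-- pv_equiv track=rewrite | github.com/YASH-bit-creator/lab-work | L9_Functions/que-3.py | creat_array
-- ===== SOURCE A (Python) =====
-- def creat_array(a,b,c,n):
--     ele = 1
--     l1 = []
--     for i in range(a):
--         l2 = []
--         for j in range(b):
--             l3 = []
--             for i in range(c):
--                 l3.append(ele)
--                 ele += 1
--             l2.append(l3)
--         l1.append(l2)
--     return(l1)
-- ===== SOURCE B (Python) =====
-- def creat_array(a, b, c, n):
--     # closed-form cell values instead of a running counter; n is unused, as in the original
--     return [[[i * (b * c) + j * c + k + 1 for k in range(c)]
--              for j in range(b)]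
--             for i in range(a)]
-- ===== Notes on version B (the rewrite author's own statement) =====
-- stated objective: simpler
-- what changed: Replaces the mutable running counter threaded through three nested loops by a single nested comprehension whose cell value is the closed-form index formula i*(b*c)+j*c+k+1.
import Mathlib
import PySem

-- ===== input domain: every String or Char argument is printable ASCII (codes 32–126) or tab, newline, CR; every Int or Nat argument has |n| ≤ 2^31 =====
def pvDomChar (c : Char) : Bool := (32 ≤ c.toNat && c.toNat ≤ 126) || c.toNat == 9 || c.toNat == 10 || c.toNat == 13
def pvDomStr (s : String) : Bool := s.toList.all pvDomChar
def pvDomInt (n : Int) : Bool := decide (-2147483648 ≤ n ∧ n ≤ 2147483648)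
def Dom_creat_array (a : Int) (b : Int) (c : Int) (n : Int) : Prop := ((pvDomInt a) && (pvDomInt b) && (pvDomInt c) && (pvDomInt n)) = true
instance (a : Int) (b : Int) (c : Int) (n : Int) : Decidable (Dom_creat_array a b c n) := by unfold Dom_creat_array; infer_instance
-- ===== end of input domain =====

-- B replaces A's running counter threaded through three nested loops by a nested
-- comprehension with the closed-form cell value i*(b*c)+j*c+k+1 (objective: simpler).

-- ===== PORT A =====
-- literal transliteration: three nested for-loops threading the mutable counter `ele`
def creat_array (a : Int) (b : Int) (c : Int) (_n : Int) : List (List (List Int)) :=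
  let s1 := (PySem.List.pyRange 0 a 1).foldl
    (fun (st1 : Int × List (List (List Int))) _i =>
      let s2 := (PySem.List.pyRange 0 b 1).foldl
        (fun (st2 : Int × List (List Int)) _j =>
          let s3 := (PySem.List.pyRange 0 c 1).foldl
            (fun (st3 : Int × List Int) _k =>
              (st3.1 + 1, st3.2 ++ [st3.1]))
            (st2.1, [])
          (s3.1, st2.2 ++ [s3.2]))
        (st1.1, [])
      (s2.1, st1.2 ++ [s2.2]))
    (1, [])
  s1.2

-- ===== PORT B =====
-- literal transliteration of Source B: nested comprehension, closed-form values
def creat_array_alt (a : Int) (b : Int) (c : Int) (_n : Int) : List (List (List Int)) :=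
  (PySem.List.pyRange 0 a 1).map (fun i =>
    (PySem.List.pyRange 0 b 1).map (fun j =>
      (PySem.List.pyRange 0 c 1).map (fun k =>
        i * (b * c) + j * c + k + 1)))

-- ===== PRECONDITION & SPEC =====
def Spec_creat_array (a : Int) (b : Int) (c : Int) (n : Int) (out : List (List (List Int))) : Prop := out = creat_array_alt a b c n
instance (a : Int) (b : Int) (c : Int) (n : Int) (out : List (List (List Int))) : Decidable (Spec_creat_array a b c n out) := by unfold Spec_creat_array; infer_instance

-- ===== CLAIM (what is proved, stated in full; the proofs are below) =====
def Claim_equal_creat_array : Prop := ∀ (a : Int) (b : Int) (c : Int) (n : Int), Dom_creat_array a b c n → Spec_creat_array a b c n (creat_array a b c n)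

-- ===== LEMMAS AND PROOFS =====

-- inner loop invariant: appending `c` counter values starting at e
theorem pv_inner (c : Nat) (e : Int) (L : List Int) :
    (List.range c).foldl (fun (st : Int × List Int) _ => (st.1 + 1, st.2 ++ [st.1])) (e, L)
      = (e + c, L ++ (List.range c).map (fun k => e + Int.ofNat k)) := by
  induction c generalizing e L with
  | zero => simp
  | succ m ih =>
      rw [List.range_succ, List.foldl_append, ih]
      simp [Int.ofNat_eq_natCast]
      omega

-- middle loop invariant (stated let-free, as the zeta-reduced loop body)
theorem pv_mid (b c : Nat) (e : Int) (L : List (List Int)) :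
    (List.range b).foldl
      (fun (st2 : Int × List (List Int)) _ =>
        (((List.range c).foldl (fun (st3 : Int × List Int) _ => (st3.1 + 1, st3.2 ++ [st3.1])) (st2.1, [])).1,
         st2.2 ++ [((List.range c).foldl (fun (st3 : Int × List Int) _ => (st3.1 + 1, st3.2 ++ [st3.1])) (st2.1, [])).2])) (e, L)
      = (e + b * c,
         L ++ (List.range b).map (fun j => (List.range c).map (fun k => e + Int.ofNat j * c + Int.ofNat k))) := by
  induction b generalizing e L with
  | zero => simp
  | succ m ih =>
      rw [List.range_succ, List.foldl_append, ih]
      simp [pv_inner, Int.ofNat_eq_natCast]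
      ring

-- outer loop invariant (let-free)
theorem pv_outer (a b c : Nat) (e : Int) (L : List (List (List Int))) :
    (List.range a).foldl
      (fun (st1 : Int × List (List (List Int))) _ =>
        (((List.range b).foldl
            (fun (st2 : Int × List (List Int)) _ =>
              (((List.range c).foldl (fun (st3 : Int × List Int) _ => (st3.1 + 1, st3.2 ++ [st3.1])) (st2.1, [])).1,
               st2.2 ++ [((List.range c).foldl (fun (st3 : Int × List Int) _ => (st3.1 + 1, st3.2 ++ [st3.1])) (st2.1, [])).2])) (st1.1, [])).1,
         st1.2 ++ [((List.range b).foldl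
            (fun (st2 : Int × List (List Int)) _ =>
              (((List.range c).foldl (fun (st3 : Int × List Int) _ => (st3.1 + 1, st3.2 ++ [st3.1])) (st2.1, [])).1,
               st2.2 ++ [((List.range c).foldl (fun (st3 : Int × List Int) _ => (st3.1 + 1, st3.2 ++ [st3.1])) (st2.1, [])).2])) (st1.1, [])).2])) (e, L)
      = (e + a * (b * c),
         L ++ (List.range a).map (fun i =>
           (List.range b).map (fun j => (List.range c).map (fun k => e + Int.ofNat i * ((b : Int) * c) + Int.ofNat j * c + Int.ofNat k)))) := by
  induction a generalizing e L with
  | zero => simp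
  | succ m ih =>
      rw [List.range_succ, List.foldl_append, ih]
      simp [pv_mid, Int.ofNat_eq_natCast]
      ring

-- fold over pyRange ignoring the element = fold over List.range of the same length
theorem pv_foldl_pyRange {β : Type} (m : Int) (f : β → β) (init : β) :
    (PySem.List.pyRange 0 m 1).foldl (fun st _ => f st) init
      = (List.range m.toNat).foldl (fun st _ => f st) init := by
  rw [PySem.List.pyRange_one]
  simp [List.foldl_map]

theorem pv_map_pyRange (m : Int) {β : Type} (f : Int → β) :
    (PySem.List.pyRange 0 m 1).map f = (List.range m.toNat).map (fun k => f (Int.ofNat k)) := by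
  rw [PySem.List.pyRange_one, List.map_map]
  simp [Function.comp_def, Int.ofNat_eq_natCast]

-- ===== VERDICT (by name: the statement is the Claim_ definition above) =====
theorem creat_array_spec : Claim_equal_creat_array := by
  intro a b c n _
  show creat_array a b c n = creat_array_alt a b c n
  simp only [creat_array, creat_array_alt]
  simp only [pv_foldl_pyRange, pv_map_pyRange]
  rw [pv_outer]
  simp only [List.nil_append]
  apply List.map_congr_left; intro i _
  apply List.map_congr_left; intro j hj
  apply List.map_congr_left; intro k hk
  have h1 := List.mem_range.mp hj
  have h2 := List.mem_range.mp hk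
  have hbe : ((b.toNat : Int)) = b := by omega
  have hce : ((c.toNat : Int)) = c := by omega
  simp only [Int.ofNat_eq_natCast, hbe, hce]
  ring
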